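-- pv_equiv track=rewrite | github.com/Ashi-s/daily_coding | Arrays/element_swapping.py | element_swapping
-- ===== SOURCE A (Python) =====
-- def element_swapping(arr, k):
--   n = len(arr)
--   for i in range(n-1):
--     pos = i
--
--     for j in range(i+1, n):
--
--       if j-i > k:
--         break
--
--       if arr[j] < arr[i]:
--         pos = j
--
--     for j in range(pos, i, -1):
--       arr[j], arr[j-1] = arr[j-1], arr[j]
--
--     k -= (pos - i)
--
--   return arr
-- ===== SOURCE B (Python) =====
-- def element_swapping(arr, k):
--     # Selection-style rebuild: repeatedly pick from the remaining suffix the last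
--     # element (within the swap budget) smaller than its head, remove it, append
--     # it to the output; returns a new list (A mutates arr in place instead).
--     rest = list(arr)
--     out = []
--     while rest:
--         head = rest[0]
--         limit = min(k, len(rest) - 1)
--         j = 0
--         for t in range(limit, 0, -1):  # backwards: first hit = last smaller
--             if rest[t] < head:
--                 j = t
--                 break
--         out.append(rest[j])
--         del rest[j]
--         k -= j
--     return out
-- ===== Notes on version B (the rewrite author's own statement) =====
-- stated objective: alternative
-- what changed: B replaces A's in-place adjacent-swap rotations on one mutable array with a selection-style rebuild: it repeatedly finds (scanning the budget window backwards, first hit) the last element smaller than the head, deletes it from the remaining list and appends it to a fresh output list.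
import Mathlib
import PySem

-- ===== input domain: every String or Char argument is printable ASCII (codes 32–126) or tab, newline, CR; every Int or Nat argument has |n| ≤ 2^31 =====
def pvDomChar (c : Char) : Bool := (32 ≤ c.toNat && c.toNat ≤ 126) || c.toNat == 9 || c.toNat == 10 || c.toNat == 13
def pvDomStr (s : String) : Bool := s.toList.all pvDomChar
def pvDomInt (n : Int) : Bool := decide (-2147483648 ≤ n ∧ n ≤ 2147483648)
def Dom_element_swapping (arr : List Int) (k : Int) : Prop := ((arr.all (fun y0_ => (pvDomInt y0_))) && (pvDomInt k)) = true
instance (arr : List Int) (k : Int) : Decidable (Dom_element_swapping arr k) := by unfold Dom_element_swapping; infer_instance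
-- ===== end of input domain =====

-- B rebuilds the result by repeated select-and-delete on a fresh list instead of A's
-- in-place adjacent-swap rotations; equivalence is about the RETURN value only (A also
-- mutates its argument in place, B does not).

-- ===== PORT A =====
-- inner scan: for j in range(i+1, n): if j-i > k: break; if arr[j] < arr[i]: pos = j
def pvAInner (arr : List Int) (i k : Int) : List Int → Int → Int
  | [], pos => pos
  | j :: js, pos =>
    if j - i > k then pos
    else pvAInner arr i k js
      (if PySem.List.pyGetD arr j 0 < PySem.List.pyGetD arr i 0 then j else pos)

-- rotation: for j in range(pos, i, -1): arr[j], arr[j-1] = arr[j-1], arr[j]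
def pvARot : List Int → List Int → List Int
  | [], arr => arr
  | j :: js, arr =>
    let a := PySem.List.pyGetD arr j 0
    let b := PySem.List.pyGetD arr (j-1) 0
    pvARot js (PySem.List.pySetD (PySem.List.pySetD arr j b) (j-1) a)

-- outer loop: for i in range(n-1), carrying (arr, k)
def pvALoop (n : Int) : List Int → List Int → Int → List Int
  | [], arr, _ => arr
  | i :: is, arr, k =>
    let pos := pvAInner arr i k (PySem.List.pyRange (i+1) n 1) i
    let arr' := pvARot (PySem.List.pyRange pos i (-1)) arr
    pvALoop n is arr' (k - (pos - i))

def element_swapping (arr : List Int) (k : Int) : List Int :=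
  let n : Int := PySem.List.len arr
  pvALoop n (PySem.List.pyRange 0 (n-1) 1) arr k

-- ===== PORT B =====
-- for t in range(limit, 0, -1): if rest[t] < head: j = t; break   (else j = 0)
def pvBFind (rest : List Int) (head : Int) : List Int → Int
  | [] => 0
  | t :: ts => if PySem.List.pyGetD rest t 0 < head then t else pvBFind rest head ts

-- while rest: pick rest[j], delete it, k -= j   (fuel = initial length; rest shrinks by 1 each turn)
def pvBLoop : Nat → List Int → Int → List Int
  | 0, _, _ => []
  | _ + 1, [], _ => []
  | fuel + 1, head :: tl, k =>
    let rest := head :: tl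
    let limit := min k (PySem.List.len rest - 1)
    let j := pvBFind rest head (PySem.List.pyRange limit 0 (-1))
    PySem.List.pyGetD rest j 0 :: pvBLoop fuel (rest.eraseIdx j.toNat) (k - j)

def element_swapping_alt (arr : List Int) (k : Int) : List Int :=
  pvBLoop arr.length arr k

-- ===== PRECONDITION & SPEC =====
def Spec_element_swapping (arr : List Int) (k : Int) (out : List Int) : Prop := out = element_swapping_alt arr k
instance (arr : List Int) (k : Int) (out : List Int) : Decidable (Spec_element_swapping arr k out) := by unfold Spec_element_swapping; infer_instance

-- ===== CLAIM (what is proved, stated in full; the proofs are below) =====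
def Claim_equal_element_swapping : Prop := ∀ (arr : List Int) (k : Int), Dom_element_swapping arr k → Spec_element_swapping arr k (element_swapping arr k)

-- ===== LEMMAS AND PROOFS =====

-- common value of both scans: greatest t in [1,c] with rest[t] < head, else 0
def posSpec (rest : List Int) (head : Int) : Nat → Nat
  | 0 => 0
  | c + 1 =>
    if PySem.List.pyGetD rest ((c : Int) + 1) 0 < head then c + 1 else posSpec rest head c

lemma posSpec_le (rest : List Int) (head : Int) (c : Nat) : posSpec rest head c ≤ c := by
  induction c with
  | zero => simp [posSpec]
  | succ c ih => unfold posSpec; split <;> omega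

-- B's backward scan computes posSpec
lemma bFind_eq (rest : List Int) (head : Int) :
    ∀ (c : Nat) (L : Int), L.toNat = c →
      pvBFind rest head (PySem.List.pyRange L 0 (-1)) = posSpec rest head c := by
  intro c
  induction c with
  | zero =>
    intro L hL
    rw [PySem.List.pyRange_neg_one_eq_nil (by omega)]
    simp [pvBFind, posSpec]
  | succ c ih =>
    intro L hL
    rw [PySem.List.pyRange_neg_one_cons (by omega)]
    have hLc : L = (c : Int) + 1 := by omega
    simp only [pvBFind, posSpec, hLc]
    split
    · push_cast; ring
    · exact ih _ (by omega)

-- A's break-scan equals the pure forward scan over the truncated range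
def fscan (arr : List Int) (i : Int) : List Int → Int → Int
  | [], p => p
  | j :: js, p =>
    fscan arr i js (if PySem.List.pyGetD arr j 0 < PySem.List.pyGetD arr i 0 then j else p)

lemma breakElim (arr : List Int) (i k b : Int) :
    ∀ (d : Nat) (a p : Int), (b - a).toNat ≤ d →
      pvAInner arr i k (PySem.List.pyRange a b 1) p
        = fscan arr i (PySem.List.pyRange a (min b (i + k + 1)) 1) p := by
  intro d
  induction d with
  | zero =>
    intro a p h
    rw [PySem.List.pyRange_one_eq_nil (by omega), PySem.List.pyRange_one_eq_nil (by omega)]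
    simp [pvAInner, fscan]
  | succ d ih =>
    intro a p h
    by_cases hab : b ≤ a
    · rw [PySem.List.pyRange_one_eq_nil hab, PySem.List.pyRange_one_eq_nil (by omega)]
      simp [pvAInner, fscan]
    · rw [PySem.List.pyRange_one_cons (by omega)]
      by_cases hbr : a - i > k
      · have hnil : PySem.List.pyRange a (min b (i + k + 1)) 1 = [] :=
          PySem.List.pyRange_one_eq_nil (by omega)
        rw [hnil]
        simp [pvAInner, hbr, fscan]
      · have hcons : PySem.List.pyRange a (min b (i + k + 1)) 1
            = a :: PySem.List.pyRange (a + 1) (min b (i + k + 1)) 1 :=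
          PySem.List.pyRange_one_cons (by omega)
        rw [hcons]
        simp only [pvAInner, fscan, if_neg hbr]
        exact ih (a + 1) _ (by omega)

lemma fscan_snoc (arr : List Int) (i : Int) (r : List Int) (j p : Int) :
    fscan arr i (r ++ [j]) p
      = if PySem.List.pyGetD arr j 0 < PySem.List.pyGetD arr i 0 then j
        else fscan arr i r p := by
  induction r generalizing p with
  | nil => simp [fscan]
  | cons x xs ih => simp only [List.cons_append, fscan]; exact ih _

lemma pyGetD_append_off (pre rest : List Int) (t : Nat) (d : Int) :
    PySem.List.pyGetD (pre ++ rest) ((pre.length : Int) + t) d = PySem.List.pyGetD rest (t : Int) d := by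
  simp only [PySem.List.pyGetD, PySem.List.pyGet?_append_right]
  simp

lemma fscan_eq (pre rest : List Int) (head : Int) (hh : rest.getD 0 0 = head) :
    ∀ (c : Nat), c < rest.length →
      fscan (pre ++ rest) (pre.length : Int)
          (PySem.List.pyRange ((pre.length : Int) + 1) ((pre.length : Int) + 1 + c) 1)
          (pre.length : Int)
        = (pre.length : Int) + posSpec rest head c := by
  intro c
  induction c with
  | zero =>
    intro _
    rw [PySem.List.pyRange_one_eq_nil (by push_cast; omega)]
    simp [fscan, posSpec]
  | succ c ih =>
    intro hc
    have hb : (pre.length : Int) + 1 + ((c + 1 : Nat) : Int)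
        = ((pre.length : Int) + 1 + c) + 1 := by push_cast; ring
    rw [hb, PySem.List.pyRange_one_succ_right (by omega), fscan_snoc]
    have h0 : PySem.List.pyGetD (pre ++ rest) ((pre.length : Int)) 0 = head := by
      have h := pyGetD_append_off pre rest 0 0
      simp only [Nat.cast_zero, add_zero] at h
      rw [h, PySem.List.pyGetD_zero]
      exact hh
    have h1 : PySem.List.pyGetD (pre ++ rest) ((pre.length : Int) + 1 + c) 0
        = PySem.List.pyGetD rest ((c : Int) + 1) 0 := by
      have e : (pre.length : Int) + 1 + c = (pre.length : Int) + ((c + 1 : Nat) : Int) := by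
        push_cast; ring
      rw [e, pyGetD_append_off pre rest (c + 1) 0]
      norm_cast
    rw [h0, h1]
    simp only [posSpec]
    split
    · push_cast; ring
    · exact ih (by omega)

-- one adjacent-swap step of A's rotation, as list surgery
lemma swap_step (xs ys : List Int) (u v : Int) :
    PySem.List.pySetD
      (PySem.List.pySetD (xs ++ u :: v :: ys) ((xs.length : Int) + 1)
        (PySem.List.pyGetD (xs ++ u :: v :: ys) ((xs.length : Int) + 1 - 1) 0))
      ((xs.length : Int) + 1 - 1)
      (PySem.List.pyGetD (xs ++ u :: v :: ys) ((xs.length : Int) + 1) 0)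
    = xs ++ v :: u :: ys := by
  have e1 : (xs.length : Int) + 1 - 1 = ((xs.length : Nat) : Int) := by ring
  have hgv : PySem.List.pyGetD (xs ++ u :: v :: ys) ((xs.length : Int) + 1) 0 = v := by
    have e2 : (xs.length : Int) + 1 = ((xs.length + 1 : Nat) : Int) := by push_cast; ring
    rw [e2, PySem.List.pyGetD_natCast]
    simp [List.getD]
  have hgu : PySem.List.pyGetD (xs ++ u :: v :: ys) ((xs.length : Int) + 1 - 1) 0 = u := by
    rw [e1, PySem.List.pyGetD_natCast]
    simp [List.getD]
  rw [hgv, hgu]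
  have hs1 : PySem.List.pySetD (xs ++ u :: v :: ys) ((xs.length : Int) + 1) u
      = xs ++ u :: u :: ys := by
    have e2 : (xs.length : Int) + 1 = ((xs.length + 1 : Nat) : Int) := by push_cast; ring
    rw [e2, PySem.List.pySetD_natCast]
    simp
  rw [hs1, e1, PySem.List.pySetD_natCast]
  simp

-- rotation lemma: rotating arr[i..i+|seg|] right by one
lemma rot_eq (pre : List Int) :
    ∀ (seg : List Int) (v : Int) (tail : List Int),
      pvARot (PySem.List.pyRange ((pre.length : Int) + seg.length) (pre.length : Int) (-1))
          (pre ++ (seg ++ v :: tail))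
        = pre ++ v :: (seg ++ tail) := by
  intro seg
  induction seg using List.reverseRecOn with
  | nil =>
    intro v tail
    rw [PySem.List.pyRange_neg_one_eq_nil (by simp)]
    simp [pvARot]
  | append_singleton s u ih =>
    intro v tail
    have hlen : ((s ++ [u]).length : Int) = (s.length : Int) + 1 := by simp
    rw [hlen, PySem.List.pyRange_neg_one_cons (by omega)]
    simp only [pvARot]
    have harr : pre ++ ((s ++ [u]) ++ v :: tail) = (pre ++ s) ++ u :: v :: tail := by simp
    have hj : (pre.length : Int) + ((s.length : Int) + 1) = ((pre ++ s).length : Int) + 1 := by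
      simp only [List.length_append, Nat.cast_add]; ring
    rw [harr, hj, swap_step]
    have hb : ((pre ++ s).length : Int) + 1 - 1 = (pre.length : Int) + (s.length : Int) := by
      simp
    rw [hb]
    have harr2 : (pre ++ s) ++ v :: u :: tail = pre ++ (s ++ v :: u :: tail) := by simp
    rw [harr2]
    have := ih v (u :: tail)
    rw [show (pre.length : Int) + ((s : List Int).length : Int) = (pre.length : Int) + (s.length : Int) from rfl] at this
    rw [this]
    simp

-- one step of B's loop, with the scan resolved to posSpec
lemma bLoop_succ (fuel : Nat) (head : Int) (tl : List Int) (k : Int) :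
    pvBLoop (fuel + 1) (head :: tl) k
      = PySem.List.pyGetD (head :: tl)
            ((posSpec (head :: tl) head (min k (tl.length : Int)).toNat : Nat) : Int) 0
        :: pvBLoop fuel
            ((head :: tl).eraseIdx (posSpec (head :: tl) head (min k (tl.length : Int)).toNat))
            (k - (posSpec (head :: tl) head (min k (tl.length : Int)).toNat : Int)) := by
  simp only [pvBLoop]
  have hlim : min k (PySem.List.len (head :: tl) - 1) = min k (tl.length : Int) := by
    simp [PySem.List.len_eq]
  rw [hlim, bFind_eq (head :: tl) head (min k (tl.length : Int)).toNat _ rfl]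
  simp

-- main loop correspondence
lemma main_eq : ∀ (m : Nat) (pre rest : List Int) (k : Int), rest.length = m →
    pvALoop ((pre.length : Int) + m)
        (PySem.List.pyRange (pre.length : Int) ((pre.length : Int) + m - 1) 1)
        (pre ++ rest) k
      = pre ++ pvBLoop m rest k := by
  intro m
  induction m with
  | zero =>
    intro pre rest k h
    have hr : rest = [] := List.eq_nil_of_length_eq_zero h
    subst hr
    rw [PySem.List.pyRange_one_eq_nil (by push_cast; omega)]
    simp [pvALoop, pvBLoop]
  | succ m ih =>
    intro pre rest k h
    obtain ⟨head, tl, rfl⟩ : ∃ a l, rest = a :: l := by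
      cases rest with
      | nil => simp at h
      | cons a l => exact ⟨a, l, rfl⟩
    have htl : tl.length = m := by simpa using h
    subst htl
    set L : Int := (pre.length : Int) with hL
    set c : Nat := (min k (tl.length : Int)).toNat with hc
    set q : Nat := posSpec (head :: tl) head c with hqdef
    have hqc : q ≤ c := posSpec_le _ _ _
    have hcm : c ≤ tl.length := by omega
    -- B side: one step of pvBLoop
    have hB := bLoop_succ tl.length head tl k
    rw [← hc, ← hqdef] at hB
    cases Nat.eq_zero_or_pos tl.length with
    | inl h0 =>
      -- last element: A's outer range is empty, B picks index 0
      obtain rfl : tl = [] := List.eq_nil_of_length_eq_zero h0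
      have hq0 : q = 0 := by omega
      rw [PySem.List.pyRange_one_eq_nil (by push_cast; omega)]
      rw [hB, hq0]
      simp [pvALoop, pvBLoop]
    | inr hm1 =>
      have hcons : PySem.List.pyRange L (L + ((tl.length + 1 : Nat) : Int) - 1) 1
          = L :: PySem.List.pyRange (L + 1) (L + ((tl.length + 1 : Nat) : Int) - 1) 1 :=
        PySem.List.pyRange_one_cons (by push_cast; omega)
      rw [hcons]
      simp only [pvALoop]
      -- the inner scan returns L + q
      have hpos : pvAInner (pre ++ head :: tl) L k
          (PySem.List.pyRange (L + 1) (L + ((tl.length + 1 : Nat) : Int)) 1) L = L + (q : Int) := by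
        rw [breakElim (pre ++ head :: tl) L k (L + ((tl.length + 1 : Nat) : Int))
          ((L + ((tl.length + 1 : Nat) : Int) - (L + 1)).toNat) (L + 1) L le_rfl]
        have hr : PySem.List.pyRange (L + 1) (min (L + ((tl.length + 1 : Nat) : Int)) (L + k + 1)) 1
            = PySem.List.pyRange (L + 1) (L + 1 + (c : Int)) 1 := by
          rw [PySem.List.pyRange_one, PySem.List.pyRange_one]
          have : (min (L + ((tl.length + 1 : Nat) : Int)) (L + k + 1) - (L + 1)).toNat
              = (L + 1 + (c : Int) - (L + 1)).toNat := by push_cast; omega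
          rw [this]
        rw [hr]
        exact fscan_eq pre (head :: tl) head rfl c (by simp; omega)
      rw [hpos]
      -- the rotation moves element q to the front of the suffix
      have hsplit : head :: tl
          = (head :: tl).take q ++ (head :: tl)[q] :: (head :: tl).drop (q + 1) := by
        conv_lhs => rw [← List.take_append_drop q (head :: tl)]
        rw [List.drop_eq_getElem_cons (by simp; omega)]
      have hlenq : (((head :: tl).take q).length : Int) = (q : Int) := by simp; omega
      have hrot : pvARot (PySem.List.pyRange (L + (q : Int)) L (-1)) (pre ++ head :: tl)
          = pre ++ (head :: tl)[q] :: ((head :: tl).take q ++ (head :: tl).drop (q + 1)) := by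
        conv_lhs => rw [hsplit]
        rw [← hlenq]
        exact rot_eq pre ((head :: tl).take q) ((head :: tl)[q]) ((head :: tl).drop (q + 1))
      rw [hrot]
      -- apply the induction hypothesis with the chosen element appended to the prefix
      have herase : (head :: tl).eraseIdx q = (head :: tl).take q ++ (head :: tl).drop (q + 1) :=
        List.eraseIdx_eq_take_drop_succ _ _
      have hlen' : ((head :: tl).take q ++ (head :: tl).drop (q + 1)).length = tl.length := by
        simp; omega
      have hIH := ih (pre ++ [(head :: tl)[q]])
        ((head :: tl).take q ++ (head :: tl).drop (q + 1)) (k - (q : Int)) hlen'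
      have hL1 : ((pre ++ [(head :: tl)[q]]).length : Int) = L + 1 := by simp [hL]
      rw [hL1] at hIH
      have harr : (pre ++ [(head :: tl)[q]]) ++ ((head :: tl).take q ++ (head :: tl).drop (q + 1))
          = pre ++ (head :: tl)[q] :: ((head :: tl).take q ++ (head :: tl).drop (q + 1)) := by
        simp
      rw [harr] at hIH
      have hb1 : L + 1 + ((tl.length : Nat) : Int) - 1 = L + ((tl.length + 1 : Nat) : Int) - 1 := by
        push_cast; ring
      have hn1 : L + 1 + ((tl.length : Nat) : Int) = L + ((tl.length + 1 : Nat) : Int) := by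
        push_cast; ring
      rw [hb1, hn1] at hIH
      have hk : k - (L + (q : Int) - L) = k - (q : Int) := by ring
      rw [hk, hIH, hB]
      -- reassemble: the picked value is (head :: tl)[q]
      have hval : PySem.List.pyGetD (head :: tl) ((q : Nat) : Int) 0 = (head :: tl)[q] := by
        rw [PySem.List.pyGetD_natCast]
        exact List.getD_eq_getElem _ _ (by simp; omega)
      rw [hval, herase]
      simp

-- ===== VERDICT (by name: the statement is the Claim_ definition above) =====
theorem element_swapping_spec : Claim_equal_element_swapping := by
  intro arr k _
  unfold Spec_element_swapping element_swapping element_swapping_alt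
  have h := main_eq arr.length [] arr k rfl
  simpa [PySem.List.len_eq] using h
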